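-- pv_equiv track=rewrite | github.com/netrias/netrias_client | src/netrias_client/_discovery.py | _collect_column_samples
-- ===== SOURCE A (Python) =====
-- def _collect_column_samples(rows: list[list[str]], column_count: int) -> list[list[str]]:
--     samples: list[list[str]] = [[] for _ in range(column_count)]
--     for row in rows:
--         padded = row + [""] * max(0, column_count - len(row))
--         for i in range(column_count):
--             value = padded[i].strip()
--             if value:
--                 samples[i].append(value)
--     return samples
-- ===== SOURCE B (Python) =====
-- def _collect_column_samples(rows: list[list[str]], column_count: int) -> list[list[str]]:
--     n = max(0, column_count)
--     padded = [(row + [""] * n)[:n] for row in rows]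
--     columns = list(zip(*padded)) if padded else [()] * n
--     return [[v for cell in col if (v := cell.strip())] for col in columns]
-- ===== Notes on version B (the rewrite author's own statement) =====
-- stated objective: alternative
-- what changed: Replaces A's row-major scan that mutates per-column accumulator lists with a staged pipeline: pad/truncate each row to column_count, transpose the rows into column tuples via zip(*padded), then build each output column by filtering stripped truthy cells.
import Mathlib
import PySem

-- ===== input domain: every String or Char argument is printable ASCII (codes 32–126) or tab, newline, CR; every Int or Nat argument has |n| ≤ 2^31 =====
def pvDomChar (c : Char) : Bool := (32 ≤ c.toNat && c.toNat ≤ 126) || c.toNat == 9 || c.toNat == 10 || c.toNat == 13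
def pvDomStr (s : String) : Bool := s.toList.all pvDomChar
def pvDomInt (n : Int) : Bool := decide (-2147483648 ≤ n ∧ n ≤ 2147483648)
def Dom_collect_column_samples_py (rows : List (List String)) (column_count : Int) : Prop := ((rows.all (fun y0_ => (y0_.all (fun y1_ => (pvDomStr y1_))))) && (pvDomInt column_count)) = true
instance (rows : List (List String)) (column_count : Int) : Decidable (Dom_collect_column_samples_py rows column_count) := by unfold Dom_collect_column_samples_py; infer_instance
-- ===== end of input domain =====

-- B replaces A's row-major mutate-in-place scan by a staged pipeline: pad/truncate every row to
-- column_count, transpose with zip(*padded), then filter each column; same cost, plainer shape.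

-- ===== PORT A =====
-- one step of A's inner loop: value = padded[i].strip(); if value: samples[i].append(value)
-- padded[i] is always in range here (len(padded) ≥ column_count > i), so pyGetD is exact.
def pvA_step (padded : List String) (s : List (List String)) (i : Int) : List (List String) :=
  let value := PySem.Str.strip (PySem.List.pyGetD padded i "")
  if value ≠ "" then s.modify i.toNat (fun col => col ++ [value]) else s

def pvA_processRow (column_count : Int) (samples : List (List String)) (row : List String) : List (List String) :=
  let padded := row ++ List.replicate (max 0 (column_count - (row.length : Int))).toNat ""
  (PySem.List.pyRange 0 column_count 1).foldl (pvA_step padded) samples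

def collect_column_samples_py (rows : List (List String)) (column_count : Int) : List (List String) :=
  rows.foldl (pvA_processRow column_count) (List.replicate column_count.toNat [])

-- ===== PORT B =====
-- (v := cell.strip()) kept if truthy
def pvStripOpt (cell : String) : Option String :=
  let v := PySem.Str.strip cell
  if v = "" then none else some v

-- zip(*ls), ported by hand for the case B reaches: every list in ls has length exactly n,
-- so zip yields n columns, column k holding the k-th entry of each list (exact there).
def pvZipCols (n : Nat) (ls : List (List String)) : List (List String) :=
  (List.range n).map (fun k => ls.map (fun row => row.getD k ""))

def collect_column_samples_py_alt (rows : List (List String)) (column_count : Int) : List (List String) :=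
  let n := (max 0 column_count).toNat
  let padded := rows.map (fun row => (row ++ List.replicate n "").take n)
  let columns := if padded = [] then List.replicate n ([] : List String) else pvZipCols n padded
  columns.map (fun col => col.filterMap pvStripOpt)

-- ===== PRECONDITION & SPEC =====
def Spec_collect_column_samples_py (rows : List (List String)) (column_count : Int) (out : List (List String)) : Prop := out = collect_column_samples_py_alt rows column_count
instance (rows : List (List String)) (column_count : Int) (out : List (List String)) : Decidable (Spec_collect_column_samples_py rows column_count out) := by unfold Spec_collect_column_samples_py; infer_instance

-- ===== CLAIM (what is proved, stated in full; the proofs are below) =====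
def Claim_equal_collect_column_samples_py : Prop := ∀ (rows : List (List String)) (column_count : Int), Dom_collect_column_samples_py rows column_count → Spec_collect_column_samples_py rows column_count (collect_column_samples_py rows column_count)

-- ===== LEMMAS AND PROOFS =====

-- the value A's inner loop sees at column k of a row (with virtual padding)
def pvCell (row : List String) (k : Nat) : Option String :=
  if h : k < row.length then
    let v := PySem.Str.strip row[k]
    if v = "" then none else some v
  else none

theorem pvA_step_natCast (row : List String) (p : Nat) (s : List (List String)) (k : Nat) :
    pvA_step (row ++ List.replicate p "") s (k : Int) =
      match pvCell row k with
      | some v => s.modify k (fun col => col ++ [v])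
      | none => s := by
  simp only [pvA_step, PySem.List.pyGetD_natCast, Int.toNat_natCast, pvCell]
  by_cases h : k < row.length
  · have hget : (row ++ List.replicate p "").getD k "" = row[k] := by
      rw [List.getD_eq_getElem?_getD, List.getElem?_append_left h, List.getElem?_eq_getElem h]
      rfl
    rw [hget]
    by_cases hv : PySem.Str.strip row[k] = "" <;> simp [h, hv]
  · have hstrip : PySem.Str.strip "" = "" := by decide
    have hval : ((List.replicate p ("" : String))[k - row.length]?).getD "" = "" := by
      rw [List.getElem?_replicate]; split <;> rfl
    rw [List.getD_eq_getElem?_getD, List.getElem?_append_right (by omega), hval, hstrip]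
    simp [h]

theorem pvA_step_length (padded : List String) (s : List (List String)) (i : Int) :
    (pvA_step padded s i).length = s.length := by
  by_cases h : PySem.Str.strip (PySem.List.pyGetD padded i "") = "" <;> simp [pvA_step, h]

theorem foldl_range_step_length (row : List String) (p : Nat) (n : Nat) (s : List (List String)) :
    ((List.range n).foldl (fun t (j : Nat) => pvA_step (row ++ List.replicate p "") t (j : Int)) s).length = s.length := by
  induction n generalizing s with
  | zero => rfl
  | succ n ih =>
    rw [List.range_succ, List.foldl_append]
    simp [pvA_step_length, ih]

-- effect of A's inner loop (over columns 0..n-1) on entry k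
theorem foldl_range_step_getElem? (row : List String) (p : Nat) (n : Nat)
    (s : List (List String)) (k : Nat) (hk : k < s.length) :
    ((List.range n).foldl (fun t (j : Nat) => pvA_step (row ++ List.replicate p "") t (j : Int)) s)[k]? =
      if k < n then some (s[k] ++ (pvCell row k).toList) else s[k]? := by
  induction n generalizing s with
  | zero => simp [List.getElem?_eq_getElem hk]
  | succ n ih =>
    rw [List.range_succ, List.foldl_append]
    simp only [List.foldl_cons, List.foldl_nil]
    rw [pvA_step_natCast]
    by_cases hkn : k < n
    · have hne : n ≠ k := by omega
      cases hc : pvCell row n with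
      | none => simp [ih s hk, hkn]; omega
      | some v =>
        rw [List.getElem?_modify_ne _ _ hne]
        simp [ih s hk, hkn]; omega
    · by_cases hkeq : k = n
      · subst hkeq
        have hfk := ih s hk
        cases hc : pvCell row k with
        | none => simp [hfk, List.getElem?_eq_getElem hk]
        | some v =>
          rw [List.getElem?_modify_eq]
          simp [hfk, List.getElem?_eq_getElem hk]
      · have hne : n ≠ k := fun h => hkeq h.symm
        cases hc : pvCell row n with
        | none => simp [ih s hk, hkn]; omega
        | some v =>
          rw [List.getElem?_modify_ne _ _ hne]
          simp [ih s hk, hkn]; omega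

theorem processRow_getElem? (c : Int) (s : List (List String)) (row : List String)
    (hs : s.length = c.toNat) (k : Nat) (hk : k < s.length) :
    (pvA_processRow c s row)[k]? = some (s[k] ++ (pvCell row k).toList) := by
  unfold pvA_processRow
  rw [PySem.List.pyRange_one]
  simp only [Int.sub_zero, List.foldl_map, Int.zero_add]
  rw [foldl_range_step_getElem? row _ c.toNat s k hk]
  simp [hs ▸ hk]

theorem processRow_length (c : Int) (s : List (List String)) (row : List String) :
    (pvA_processRow c s row).length = s.length := by
  unfold pvA_processRow
  rw [PySem.List.pyRange_one]
  simp only [Int.sub_zero, List.foldl_map, Int.zero_add]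
  exact foldl_range_step_length row _ c.toNat s

-- the outer fold of A, with a generalized accumulator of the right length
theorem foldl_processRow_eq (c : Int) (rows : List (List String)) :
    ∀ (s : List (List String)), s.length = c.toNat →
    rows.foldl (pvA_processRow c) s =
      (List.range c.toNat).map (fun k => s.getD k [] ++ rows.filterMap (fun row => pvCell row k)) := by
  induction rows with
  | nil =>
    intro s hs
    simp only [List.foldl_nil, List.filterMap_nil, List.append_nil]
    apply List.ext_getElem (by simp [hs])
    intro k h1 h2
    simp [List.getD, List.getElem?_eq_getElem (by omega : k < s.length)]
  | cons r rs ih =>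
    intro s hs
    rw [List.foldl_cons, ih _ (by rw [processRow_length]; exact hs)]
    apply List.ext_getElem (by simp)
    intro k h1 h2
    simp only [List.getElem_map, List.getElem_range]
    have hk : k < s.length := by simp at h1; omega
    have hp := processRow_getElem? c s r hs k hk
    rw [List.getD_eq_getElem?_getD, hp]
    simp only [Option.getD_some, List.filterMap_cons]
    rw [List.getD_eq_getElem?_getD, List.getElem?_eq_getElem hk]
    cases hc : pvCell r k <;> simp [Option.toList]

-- B's per-cell test on a padded/truncated row is exactly pvCell (for k < n)
theorem pvStripOpt_padded (n k : Nat) (hk : k < n) (row : List String) :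
    pvStripOpt (((row ++ List.replicate n "").take n).getD k "") = pvCell row k := by
  rw [List.getD_eq_getElem?_getD, List.getElem?_take]
  simp only [hk, if_pos]
  by_cases h : k < row.length
  · rw [List.getElem?_append_left h, List.getElem?_eq_getElem h]
    simp [pvStripOpt, pvCell, h]
  · have hstrip : PySem.Str.strip "" = "" := by decide
    rw [List.getElem?_append_right (by omega), List.getElem?_replicate]
    have hlt : k - row.length < n := by omega
    simp [hlt, pvStripOpt, pvCell, h, hstrip]

-- ===== VERDICT (by name: the statement is the Claim_ definition above) =====
theorem collect_column_samples_py_spec : Claim_equal_collect_column_samples_py := by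
  intro rows c _
  unfold Spec_collect_column_samples_py collect_column_samples_py collect_column_samples_py_alt
  rw [foldl_processRow_eq c rows (List.replicate c.toNat []) (by simp)]
  have hn : (max 0 c).toNat = c.toNat := by omega
  simp only [hn]
  cases rows with
  | nil =>
    simp [List.map_replicate]
  | cons r rs =>
    rw [if_neg (by simp)]
    unfold pvZipCols
    rw [List.map_map]
    apply List.map_congr_left
    intro k hk
    have hkn : k < c.toNat := List.mem_range.mp hk
    have hg : (List.replicate c.toNat ([] : List String)).getD k [] = [] := by
      rw [List.getD_eq_getElem?_getD, List.getElem?_replicate]; split <;> rfl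
    rw [hg, List.nil_append]
    simp only [Function.comp_apply]
    rw [List.map_map, List.filterMap_map]
    exact (List.filterMap_congr (fun row _ => pvStripOpt_padded c.toNat k hkn row)).symm
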